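-- pv_equiv track=rewrite | github.com/MrBrantCode/unitest_baseline | mut_generate/mist_train_taco/taco_17768/solution.py | calculate_total_charges
-- ===== SOURCE A (Python) =====
-- def calculate_total_charges(datasets):
--     S = [60, 80, 100, 120, 140, 160]
--     W = [2, 5, 10, 15, 20, 25]
--     P = [600, 800, 1000, 1200, 1400, 1600]
--
--     results = []
--
--     for dataset in datasets:
--         n = dataset[0]
--         packages = dataset[1]
--         total_charge = 0
--
--         for package in packages:
--             x, y, h, w = package
--             s = x + y + h
--
--             for j in range(6):
--                 if s <= S[j] and w <= W[j]:
--                     total_charge += P[j]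
--                     break
--
--         results.append(total_charge)
--
--     return results
-- ===== SOURCE B (Python) =====
-- def calculate_total_charges(datasets):
--     S = [60, 80, 100, 120, 140, 160]
--     W = [2, 5, 10, 15, 20, 25]
--     P = [600, 800, 1000, 1200, 1400, 1600]
--
--     results = []
--     for n, packages in datasets:
--         total_charge = 0
--         for x, y, h, w in packages:
--             # class index = count of thresholds strictly below the value
--             j = max(sum(1 for t in S if t < x + y + h),
--                     sum(1 for t in W if t < w))
--             if j < 6:
--                 total_charge += P[j]
--         results.append(total_charge)
--     return results
-- ===== Notes on version B (the rewrite author's own statement) =====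
-- stated objective: alternative
-- what changed: Replaces A's combined first-match scan over the 6 price rows with two independent monotone class-index computations (count of size thresholds below s, count of weight thresholds below w) combined by max, adding P[j] only when j < 6.
import Mathlib
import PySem

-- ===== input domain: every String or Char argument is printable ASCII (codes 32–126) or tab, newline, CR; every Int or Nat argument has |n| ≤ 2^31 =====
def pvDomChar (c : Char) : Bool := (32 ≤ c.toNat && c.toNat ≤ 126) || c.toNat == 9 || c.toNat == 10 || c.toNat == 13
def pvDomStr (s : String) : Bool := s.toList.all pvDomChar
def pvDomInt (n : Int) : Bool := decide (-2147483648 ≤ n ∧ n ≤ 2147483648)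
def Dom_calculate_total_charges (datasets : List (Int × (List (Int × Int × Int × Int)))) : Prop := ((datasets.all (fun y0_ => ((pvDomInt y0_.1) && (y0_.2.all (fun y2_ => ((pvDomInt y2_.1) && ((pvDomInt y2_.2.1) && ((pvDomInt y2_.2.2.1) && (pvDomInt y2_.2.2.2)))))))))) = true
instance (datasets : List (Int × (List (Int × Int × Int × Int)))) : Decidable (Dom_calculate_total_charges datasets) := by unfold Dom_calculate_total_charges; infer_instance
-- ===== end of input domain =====

-- B replaces A's combined first-match scan of the 6 price rows by two independent
-- threshold class indices (count of thresholds below the value) combined by max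
-- (objective: alternative decomposition; same cost).

-- ===== PORT A =====
def pyS : List Int := [60, 80, 100, 120, 140, 160]
def pyW : List Int := [2, 5, 10, 15, 20, 25]
def pyP : List Int := [600, 800, 1000, 1200, 1400, 1600]

-- A's inner loop 'for j in range(6): if s <= S[j] and w <= W[j]: total += P[j]; break',
-- as structural recursion over the range list; returns the added charge (0 = no break fired).
def pyInner (s w : Int) : List Int → Int
  | [] => 0
  | j :: rest =>
    if s ≤ PySem.List.pyGetD pyS j 0 ∧ w ≤ PySem.List.pyGetD pyW j 0 then
      PySem.List.pyGetD pyP j 0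
    else pyInner s w rest

def calculate_total_charges (datasets : List (Int × (List (Int × Int × Int × Int)))) : List Int :=
  datasets.foldl (fun results dataset =>
    let packages := dataset.2
    let total_charge := packages.foldl (fun total_charge package =>
      let s := package.1 + package.2.1 + package.2.2.1
      total_charge + pyInner s package.2.2.2 (PySem.List.pyRange 0 6 1)) 0
    results ++ [total_charge]) []

-- ===== PORT B =====
def altS : List Int := [60, 80, 100, 120, 140, 160]
def altW : List Int := [2, 5, 10, 15, 20, 25]
def altP : List Int := [600, 800, 1000, 1200, 1400, 1600]

-- sum(1 for t in T if t < v): class index of v in the sorted threshold table T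
def clsIdx (v : Int) (T : List Int) : Int := ((T.filter (fun t => t < v)).length : Int)

-- charge of one package: max of the two class indices, P[j] if j < 6 else nothing
def altCharge (s w : Int) : Int :=
  let j := max (clsIdx s altS) (clsIdx w altW)
  if j < 6 then altP.getD j.toNat 0 else 0

def calculate_total_charges_alt (datasets : List (Int × (List (Int × Int × Int × Int)))) : List Int :=
  datasets.foldl (fun results d =>
    results ++ [d.2.foldl (fun total p =>
      total + altCharge (p.1 + p.2.1 + p.2.2.1) p.2.2.2) 0]) []

-- ===== PRECONDITION & SPEC =====
def Spec_calculate_total_charges (datasets : List (Int × (List (Int × Int × Int × Int)))) (out : List Int) : Prop := out = calculate_total_charges_alt datasets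
instance (datasets : List (Int × (List (Int × Int × Int × Int)))) (out : List Int) : Decidable (Spec_calculate_total_charges datasets out) := by unfold Spec_calculate_total_charges; infer_instance

-- ===== CLAIM (what is proved, stated in full; the proofs are below) =====
def Claim_equal_calculate_total_charges : Prop := ∀ (datasets : List (Int × (List (Int × Int × Int × Int)))), Dom_calculate_total_charges datasets → Spec_calculate_total_charges datasets (calculate_total_charges datasets)

-- ===== LEMMAS AND PROOFS =====

lemma clsIdx_S (s : Int) : clsIdx s altS =
    if s ≤ 60 then 0 else if s ≤ 80 then 1 else if s ≤ 100 then 2 else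
    if s ≤ 120 then 3 else if s ≤ 140 then 4 else if s ≤ 160 then 5 else 6 := by
  simp only [clsIdx, altS]
  by_cases h1 : (60:Int) < s <;> by_cases h2 : (80:Int) < s <;> by_cases h3 : (100:Int) < s <;>
    by_cases h4 : (120:Int) < s <;> by_cases h5 : (140:Int) < s <;> by_cases h6 : (160:Int) < s <;>
    simp [List.filter, h1, h2, h3, h4, h5, h6] <;> omega

lemma clsIdx_W (w : Int) : clsIdx w altW =
    if w ≤ 2 then 0 else if w ≤ 5 then 1 else if w ≤ 10 then 2 else
    if w ≤ 15 then 3 else if w ≤ 20 then 4 else if w ≤ 25 then 5 else 6 := by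
  simp only [clsIdx, altW]
  by_cases h1 : (2:Int) < w <;> by_cases h2 : (5:Int) < w <;> by_cases h3 : (10:Int) < w <;>
    by_cases h4 : (15:Int) < w <;> by_cases h5 : (20:Int) < w <;> by_cases h6 : (25:Int) < w <;>
    simp [List.filter, h1, h2, h3, h4, h5, h6] <;> omega

lemma pyInner_chain (s w : Int) : pyInner s w [0, 1, 2, 3, 4, 5] =
    if s ≤ 60 ∧ w ≤ 2 then 600 else if s ≤ 80 ∧ w ≤ 5 then 800 else
    if s ≤ 100 ∧ w ≤ 10 then 1000 else if s ≤ 120 ∧ w ≤ 15 then 1200 else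
    if s ≤ 140 ∧ w ≤ 20 then 1400 else if s ≤ 160 ∧ w ≤ 25 then 1600 else 0 := by
  simp [pyInner, pyS, pyW, pyP, PySem.List.pyGetD, PySem.List.pyGet?, PySem.List.pyIdx?]

-- B's per-package charge as a function of the joint class index
def pChoose (j : Int) : Int := if j < 6 then altP.getD j.toNat 0 else 0

set_option maxHeartbeats 2000000 in
lemma chains_eq (s w : Int) :
    (if s ≤ 60 ∧ w ≤ 2 then (600:Int) else if s ≤ 80 ∧ w ≤ 5 then 800 else
     if s ≤ 100 ∧ w ≤ 10 then 1000 else if s ≤ 120 ∧ w ≤ 15 then 1200 else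
     if s ≤ 140 ∧ w ≤ 20 then 1400 else if s ≤ 160 ∧ w ≤ 25 then 1600 else 0) =
    (pChoose (max
        (if s ≤ 60 then (0:Int) else if s ≤ 80 then 1 else if s ≤ 100 then 2 else
         if s ≤ 120 then 3 else if s ≤ 140 then 4 else if s ≤ 160 then 5 else 6)
        (if w ≤ 2 then (0:Int) else if w ≤ 5 then 1 else if w ≤ 10 then 2 else
         if w ≤ 15 then 3 else if w ≤ 20 then 4 else if w ≤ 25 then 5 else 6))) := by
  have hs : (s ≤ 60) ∨ (¬s ≤ 60 ∧ s ≤ 80) ∨ (¬s ≤ 60 ∧ ¬s ≤ 80 ∧ s ≤ 100) ∨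
      (¬s ≤ 60 ∧ ¬s ≤ 80 ∧ ¬s ≤ 100 ∧ s ≤ 120) ∨
      (¬s ≤ 60 ∧ ¬s ≤ 80 ∧ ¬s ≤ 100 ∧ ¬s ≤ 120 ∧ s ≤ 140) ∨
      (¬s ≤ 60 ∧ ¬s ≤ 80 ∧ ¬s ≤ 100 ∧ ¬s ≤ 120 ∧ ¬s ≤ 140 ∧ s ≤ 160) ∨
      (¬s ≤ 60 ∧ ¬s ≤ 80 ∧ ¬s ≤ 100 ∧ ¬s ≤ 120 ∧ ¬s ≤ 140 ∧ ¬s ≤ 160) := by omega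
  have hw : (w ≤ 2) ∨ (¬w ≤ 2 ∧ w ≤ 5) ∨ (¬w ≤ 2 ∧ ¬w ≤ 5 ∧ w ≤ 10) ∨
      (¬w ≤ 2 ∧ ¬w ≤ 5 ∧ ¬w ≤ 10 ∧ w ≤ 15) ∨
      (¬w ≤ 2 ∧ ¬w ≤ 5 ∧ ¬w ≤ 10 ∧ ¬w ≤ 15 ∧ w ≤ 20) ∨
      (¬w ≤ 2 ∧ ¬w ≤ 5 ∧ ¬w ≤ 10 ∧ ¬w ≤ 15 ∧ ¬w ≤ 20 ∧ w ≤ 25) ∨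
      (¬w ≤ 2 ∧ ¬w ≤ 5 ∧ ¬w ≤ 10 ∧ ¬w ≤ 15 ∧ ¬w ≤ 20 ∧ ¬w ≤ 25) := by omega
  rcases hs with h|h|h|h|h|h|h <;> rcases hw with g|g|g|g|g|g|g <;>
    simp [pChoose, altP, h, g] <;> omega

lemma charge_eq (s w : Int) : pyInner s w (PySem.List.pyRange 0 6 1) = altCharge s w := by
  have h : PySem.List.pyRange 0 6 1 = [0, 1, 2, 3, 4, 5] := by decide
  rw [h, pyInner_chain,
    show altCharge s w = pChoose (max (clsIdx s altS) (clsIdx w altW)) from rfl,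
    clsIdx_S, clsIdx_W]
  exact chains_eq s w

lemma pkgs_eq (pkgs : List (Int × Int × Int × Int)) (t : Int) :
    pkgs.foldl (fun total_charge package =>
      let s := package.1 + package.2.1 + package.2.2.1
      total_charge + pyInner s package.2.2.2 (PySem.List.pyRange 0 6 1)) t =
    pkgs.foldl (fun total p => total + altCharge (p.1 + p.2.1 + p.2.2.1) p.2.2.2) t := by
  induction pkgs generalizing t with
  | nil => rfl
  | cons p rest ih =>
    simp only [List.foldl]
    rw [charge_eq]
    exact ih _

lemma outer_eq (datasets : List (Int × (List (Int × Int × Int × Int)))) (acc : List Int) :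
    datasets.foldl (fun results dataset =>
      let packages := dataset.2
      let total_charge := packages.foldl (fun total_charge package =>
        let s := package.1 + package.2.1 + package.2.2.1
        total_charge + pyInner s package.2.2.2 (PySem.List.pyRange 0 6 1)) 0
      results ++ [total_charge]) acc =
    datasets.foldl (fun results d =>
      results ++ [d.2.foldl (fun total p =>
        total + altCharge (p.1 + p.2.1 + p.2.2.1) p.2.2.2) 0]) acc := by
  induction datasets generalizing acc with
  | nil => rfl
  | cons d rest ih =>
    simp only [List.foldl]
    rw [pkgs_eq]
    exact ih _

-- ===== VERDICT (by name: the statement is the Claim_ definition above) =====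
theorem calculate_total_charges_spec : Claim_equal_calculate_total_charges := by
  intro datasets _
  unfold Spec_calculate_total_charges calculate_total_charges calculate_total_charges_alt
  exact outer_eq datasets []
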